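-- pv_equiv track=rewrite | github.com/SamuelM96/AoC2024 | python/day12.py | count_corners
-- ===== SOURCE A (Python) =====
-- def count_corners(blob):
--     min_x, min_y = min(x for x, _ in blob), min(y for _, y in blob)
--     max_x, max_y = max(x for x, _ in blob), max(y for _, y in blob)
--     corners = 0
--
--     # Blob can be up against the bounds of the grid, so account for the
--     # additional out-of-bounds space
--     for x in range(min_x - 1, max_x + 2):
--         for y in range(min_y - 1, max_y + 2):
--             # 2x2 sliding window across the blob to perform corner detection
--             quadrants = [
--                 (x, y) in blob,
--                 (x - 1, y) in blob,
--                 (x - 1, y - 1) in blob,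
--                 (x, y - 1) in blob,
--             ]
--             filled = sum(quadrants)
--
--             if filled == 1 or filled == 3:
--                 # Convex and concave corner cases
--                 # . .  # A .
--                 # A .  # A A
--                 corners += 1
--             elif filled == 2:
--                 # Diagonal corners for shapes with holes
--                 # A .   # . A
--                 # . A   # A .
--                 if (quadrants[0] and quadrants[2]) or (quadrants[1] and quadrants[3]):
--                     corners += 2
--
--     return corners
-- ===== SOURCE B (Python) =====
-- def count_corners(blob):
--     cells = set(blob)
--     windows = set()
--     for (x, y) in cells:
--         for dx in (0, 1):
--             for dy in (0, 1):
--                 windows.add((x + dx, y + dy))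
--     corners = 0
--     for (x, y) in windows:
--         q = ((x, y) in cells, (x - 1, y) in cells,
--              (x - 1, y - 1) in cells, (x, y - 1) in cells)
--         filled = sum(q)
--         if filled == 1 or filled == 3:
--             corners += 1
--         elif filled == 2 and ((q[0] and q[2]) or (q[1] and q[3])):
--             corners += 2
--     return corners
-- ===== Notes on version B (the rewrite author's own statement) =====
-- stated objective: faster
-- what changed: Instead of scanning every 2x2 window in the blob's bounding box (area W*H), B enumerates only the candidate windows adjacent to some blob cell (at most 4 per cell, deduplicated in a set) and scores each once; all other windows are empty and contribute 0.
import Mathlib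
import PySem

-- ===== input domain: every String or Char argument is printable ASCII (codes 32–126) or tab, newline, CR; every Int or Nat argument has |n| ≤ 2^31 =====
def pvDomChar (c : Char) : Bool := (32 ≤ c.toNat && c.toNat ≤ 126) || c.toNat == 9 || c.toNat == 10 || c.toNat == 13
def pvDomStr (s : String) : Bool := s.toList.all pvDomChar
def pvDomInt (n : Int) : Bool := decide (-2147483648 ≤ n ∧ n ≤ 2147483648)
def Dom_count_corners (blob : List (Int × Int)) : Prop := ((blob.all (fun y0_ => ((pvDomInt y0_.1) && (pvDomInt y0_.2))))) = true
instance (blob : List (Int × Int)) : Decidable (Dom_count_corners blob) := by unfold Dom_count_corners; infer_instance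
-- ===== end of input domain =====

-- B scores only the 2x2 windows adjacent to some blob cell (collected in a set) instead of
-- scanning the whole bounding box; equivalence of the return values is proved for nonempty blobs.

-- ===== PORT A =====
-- the body of A's inner loop (the 2x2-window corner test), extracted as a helper
def pvCornerA (blob : List (Int × Int)) (corners x y : Int) : Int :=
  let q0 := decide ((x, y) ∈ blob)
  let q1 := decide ((x - 1, y) ∈ blob)
  let q2 := decide ((x - 1, y - 1) ∈ blob)
  let q3 := decide ((x, y - 1) ∈ blob)
  let filled : Int := ([q0, q1, q2, q3].map (fun b => if b then (1 : Int) else 0)).sum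
  if filled = 1 ∨ filled = 3 then corners + 1
  else if filled = 2 then
    if (q0 && q2) || (q1 && q3) then corners + 2 else corners
  else corners

def count_corners (blob : List (Int × Int)) : Int :=
  -- min()/max() of an empty sequence raise ValueError in Python; Pre_ excludes blob = []
  let min_x := (PySem.List.min? (blob.map (fun p => p.1)) (fun v => v)).getD 0
  let min_y := (PySem.List.min? (blob.map (fun p => p.2)) (fun v => v)).getD 0
  let max_x := (PySem.List.max? (blob.map (fun p => p.1)) (fun v => v)).getD 0
  let max_y := (PySem.List.max? (blob.map (fun p => p.2)) (fun v => v)).getD 0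
  (PySem.List.pyRange (min_x - 1) (max_x + 2)).foldl (fun corners x =>
    (PySem.List.pyRange (min_y - 1) (max_y + 2)).foldl (fun corners y =>
      pvCornerA blob corners x y) corners) 0

-- ===== PORT B =====
-- the body of B's scoring loop (same 2x2 corner test, membership in the cell set)
def pvCornerB (cells : PySem.Set (Int × Int)) (corners : Int) (p : Int × Int) : Int :=
  let q0 := PySem.Set.contains cells (p.1, p.2)
  let q1 := PySem.Set.contains cells (p.1 - 1, p.2)
  let q2 := PySem.Set.contains cells (p.1 - 1, p.2 - 1)
  let q3 := PySem.Set.contains cells (p.1, p.2 - 1)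
  let filled : Int := ([q0, q1, q2, q3].map (fun b => if b then (1 : Int) else 0)).sum
  if filled = 1 ∨ filled = 3 then corners + 1
  else if filled = 2 && ((q0 && q2) || (q1 && q3)) then corners + 2
  else corners

def count_corners_alt (blob : List (Int × Int)) : Int :=
  let cells : PySem.Set (Int × Int) := PySem.Set.ofList blob
  let windows : PySem.Set (Int × Int) :=
    cells.foldl (fun w p =>
      ([0, 1] : List Int).foldl (fun w dx =>
        ([0, 1] : List Int).foldl (fun w dy =>
          PySem.Set.add w (p.1 + dx, p.2 + dy)) w) w) PySem.Set.empty
  -- the final count is a sum over the window set, so Python's set iteration order is immaterial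
  windows.foldl (fun corners p => pvCornerB cells corners p) 0

-- ===== PRECONDITION & SPEC =====
-- Pre_ excludes only the empty blob, on which Python's min() raises ValueError.
def Pre_count_corners (blob : List (Int × Int)) : Prop := blob ≠ []
instance (blob : List (Int × Int)) : Decidable (Pre_count_corners blob) := by unfold Pre_count_corners; infer_instance
def pvWitness_count_corners : (List (Int × Int)) := [((0 : Int), (0 : Int))]

def Spec_count_corners (blob : List (Int × Int)) (out : Int) : Prop := out = count_corners_alt blob
instance (blob : List (Int × Int)) (out : Int) : Decidable (Spec_count_corners blob out) := by unfold Spec_count_corners; infer_instance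

-- ===== CLAIM (what is proved, stated in full; the proofs are below) =====
def Claim_equal_count_corners : Prop := ∀ (blob : List (Int × Int)), Dom_count_corners blob → Pre_count_corners blob → Spec_count_corners blob (count_corners blob)

-- ===== LEMMAS AND PROOFS =====

-- the contribution of one 2x2 window, as a pure value
def pvContrib (S : List (Int × Int)) (p : Int × Int) : Int :=
  let q0 := decide ((p.1, p.2) ∈ S)
  let q1 := decide ((p.1 - 1, p.2) ∈ S)
  let q2 := decide ((p.1 - 1, p.2 - 1) ∈ S)
  let q3 := decide ((p.1, p.2 - 1) ∈ S)
  let filled : Int := ([q0, q1, q2, q3].map (fun b => if b then (1 : Int) else 0)).sum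
  if filled = 1 ∨ filled = 3 then 1
  else if filled = 2 ∧ ((q0 && q2) || (q1 && q3)) = true then 2
  else 0

theorem pvCornerA_eq (blob : List (Int × Int)) (c x y : Int) :
    pvCornerA blob c x y = c + pvContrib blob (x, y) := by
  simp only [pvCornerA, pvContrib]
  by_cases h2 : ((decide ((x, y) ∈ blob) && decide ((x - 1, y - 1) ∈ blob)) || (decide ((x - 1, y) ∈ blob) && decide ((x, y - 1) ∈ blob))) = true <;>
    split_ifs <;> simp_all

theorem pvCornerB_eq (blob : List (Int × Int)) (c : Int) (p : Int × Int) :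
    pvCornerB (PySem.Set.ofList blob) c p = c + pvContrib blob p := by
  have hc : ∀ a : Int × Int, PySem.Set.contains (PySem.Set.ofList blob) a = decide (a ∈ blob) := by
    intro a
    simp [PySem.Set.contains, PySem.Set.mem_ofList]
  simp only [pvCornerB, pvContrib, hc]
  by_cases h2 : ((decide ((p.1, p.2) ∈ blob) && decide ((p.1 - 1, p.2 - 1) ∈ blob)) || (decide ((p.1 - 1, p.2) ∈ blob) && decide ((p.1, p.2 - 1) ∈ blob))) = true <;>
    split_ifs <;> simp_all

-- windows with no adjacent blob cell contribute nothing
theorem pvContrib_eq_zero (blob : List (Int × Int)) (p : Int × Int)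
    (h0 : (p.1, p.2) ∉ blob) (h1 : (p.1 - 1, p.2) ∉ blob)
    (h2 : (p.1 - 1, p.2 - 1) ∉ blob) (h3 : (p.1, p.2 - 1) ∉ blob) :
    pvContrib blob p = 0 := by
  simp [pvContrib, h0, h1, h2, h3]

-- the four windows generated by one cell
def pvWins (p : Int × Int) : List (Int × Int) :=
  [(p.1, p.2), (p.1, p.2 + 1), (p.1 + 1, p.2), (p.1 + 1, p.2 + 1)]

theorem mem_windows_step (w : PySem.Set (Int × Int)) (p q : Int × Int) :
    q ∈ ([0, 1] : List Int).foldl (fun w dx =>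
      ([0, 1] : List Int).foldl (fun w dy =>
        PySem.Set.add w (p.1 + dx, p.2 + dy)) w) w ↔ q ∈ w ∨ q ∈ pvWins p := by
  simp only [List.foldl, PySem.Set.mem_add, add_zero, pvWins, List.mem_cons,
    List.not_mem_nil, or_false]
  tauto

theorem mem_windows_fold (l : List (Int × Int)) (w : PySem.Set (Int × Int)) (q : Int × Int) :
    q ∈ l.foldl (fun w p =>
      ([0, 1] : List Int).foldl (fun w dx =>
        ([0, 1] : List Int).foldl (fun w dy =>
          PySem.Set.add w (p.1 + dx, p.2 + dy)) w) w) w ↔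
    q ∈ w ∨ ∃ p ∈ l, q ∈ pvWins p := by
  induction l generalizing w with
  | nil => simp
  | cons a t ih =>
    rw [List.foldl_cons, ih, mem_windows_step]
    constructor
    · rintro ((h | h) | ⟨p, hp, hq⟩)
      · exact Or.inl h
      · exact Or.inr ⟨a, List.mem_cons_self, h⟩
      · exact Or.inr ⟨p, List.mem_cons_of_mem a hp, hq⟩
    · rintro (h | ⟨p, hp, hq⟩)
      · exact Or.inl (Or.inl h)
      · rcases List.mem_cons.1 hp with rfl | hp
        · exact Or.inl (Or.inr hq)
        · exact Or.inr ⟨p, hp, hq⟩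

theorem nodup_windows_fold (l : List (Int × Int)) (w : PySem.Set (Int × Int)) (hw : w.Nodup) :
    (l.foldl (fun w p =>
      ([0, 1] : List Int).foldl (fun w dx =>
        ([0, 1] : List Int).foldl (fun w dy =>
          PySem.Set.add w (p.1 + dx, p.2 + dy)) w) w) w).Nodup := by
  induction l generalizing w with
  | nil => exact hw
  | cons a t ih =>
    exact ih _ (PySem.Set.nodup_add _ _ (PySem.Set.nodup_add _ _
      (PySem.Set.nodup_add _ _ (PySem.Set.nodup_add _ _ hw))))

-- ===== VERDICT (by name: the statement is the Claim_ definition above) =====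
theorem count_corners_spec : Claim_equal_count_corners := by
  intro blob _ hne
  unfold Spec_count_corners
  -- extrema exist on a nonempty blob
  obtain ⟨mx, hmx⟩ : ∃ m, PySem.List.min? (blob.map (fun p => p.1)) (fun v => v) = some m := by
    cases h : PySem.List.min? (blob.map (fun p => p.1)) (fun v => v) with
    | none => exact absurd ((PySem.List.min?_eq_none_iff _ _).1 h) (by simpa using hne)
    | some m => exact ⟨m, rfl⟩
  obtain ⟨my, hmy⟩ : ∃ m, PySem.List.min? (blob.map (fun p => p.2)) (fun v => v) = some m := by
    cases h : PySem.List.min? (blob.map (fun p => p.2)) (fun v => v) with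
    | none => exact absurd ((PySem.List.min?_eq_none_iff _ _).1 h) (by simpa using hne)
    | some m => exact ⟨m, rfl⟩
  obtain ⟨Mx, hMx⟩ : ∃ m, PySem.List.max? (blob.map (fun p => p.1)) (fun v => v) = some m := by
    cases h : PySem.List.max? (blob.map (fun p => p.1)) (fun v => v) with
    | none => exact absurd ((PySem.List.max?_eq_none_iff _ _).1 h) (by simpa using hne)
    | some m => exact ⟨m, rfl⟩
  obtain ⟨My, hMy⟩ : ∃ m, PySem.List.max? (blob.map (fun p => p.2)) (fun v => v) = some m := by
    cases h : PySem.List.max? (blob.map (fun p => p.2)) (fun v => v) with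
    | none => exact absurd ((PySem.List.max?_eq_none_iff _ _).1 h) (by simpa using hne)
    | some m => exact ⟨m, rfl⟩
  have hbx : ∀ p ∈ blob, mx ≤ p.1 ∧ p.1 ≤ Mx := fun p hp =>
    ⟨PySem.List.min?_isMin hmx p.1 (List.mem_map_of_mem hp),
     PySem.List.max?_isMax hMx p.1 (List.mem_map_of_mem hp)⟩
  have hby : ∀ p ∈ blob, my ≤ p.2 ∧ p.2 ≤ My := fun p hp =>
    ⟨PySem.List.min?_isMin hmy p.2 (List.mem_map_of_mem hp),
     PySem.List.max?_isMax hMy p.2 (List.mem_map_of_mem hp)⟩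
  -- A as a nested sum over the bounding-box ranges
  have hA : count_corners blob =
      ((PySem.List.pyRange (mx - 1) (Mx + 2)).map (fun x =>
        ((PySem.List.pyRange (my - 1) (My + 2)).map (fun y => pvContrib blob (x, y))).sum)).sum := by
    simp only [count_corners, hmx, hmy, hMx, hMy, Option.getD_some]
    rw [PySem.List.foldl_congr_mem _ _
      (fun c x => c + ((PySem.List.pyRange (my - 1) (My + 2)).map (fun y => pvContrib blob (x, y))).sum) 0
      (by
        intro c x _
        rw [PySem.List.foldl_congr_mem _ _ (fun c y => c + pvContrib blob (x, y)) c
          (fun c y _ => pvCornerA_eq blob c x y),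
          PySem.List.foldl_add]),
      PySem.List.foldl_add, zero_add]
  -- B as a sum over the window set
  have hB : count_corners_alt blob =
      (((PySem.Set.ofList blob).foldl (fun w p =>
        ([0, 1] : List Int).foldl (fun w dx =>
          ([0, 1] : List Int).foldl (fun w dy =>
            PySem.Set.add w (p.1 + dx, p.2 + dy)) w) w) PySem.Set.empty).map (pvContrib blob)).sum := by
    simp only [count_corners_alt]
    rw [PySem.List.foldl_congr_mem _ _ (fun c p => c + pvContrib blob p) 0
      (fun c p _ => pvCornerB_eq blob c p), PySem.List.foldl_add, zero_add]
  rw [hA, hB]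
  set Rx := PySem.List.pyRange (mx - 1) (Mx + 2) with hRx
  set Ry := PySem.List.pyRange (my - 1) (My + 2) with hRy
  set W := (PySem.Set.ofList blob).foldl (fun w p =>
      ([0, 1] : List Int).foldl (fun w dx =>
        ([0, 1] : List Int).foldl (fun w dy =>
          PySem.Set.add w (p.1 + dx, p.2 + dy)) w) w) PySem.Set.empty with hW
  have hmemW : ∀ q, q ∈ W ↔ ∃ p ∈ blob, q ∈ pvWins p := by
    intro q
    rw [hW, mem_windows_fold]
    simp only [PySem.Set.empty, List.not_mem_nil, false_or]
    constructor
    · rintro ⟨p, hp, h⟩; exact ⟨p, (PySem.Set.mem_ofList blob p).1 hp, h⟩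
    · rintro ⟨p, hp, h⟩; exact ⟨p, (PySem.Set.mem_ofList blob p).2 hp, h⟩
  -- both sides as Finset sums
  have hnRx : Rx.Nodup := PySem.List.nodup_pyRange_one _ _
  have hnRy : Ry.Nodup := PySem.List.nodup_pyRange_one _ _
  have hnW : W.Nodup := nodup_windows_fold _ _ (by simp [PySem.Set.empty])
  rw [← List.sum_toFinset _ hnW]
  have hprod : (Rx.map (fun x => (Ry.map (fun y => pvContrib blob (x, y))).sum)).sum
      = (Rx.toFinset ×ˢ Ry.toFinset).sum (pvContrib blob) := by
    rw [Finset.sum_product, ← List.sum_toFinset _ hnRx]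
    exact Finset.sum_congr rfl (fun x _ => (List.sum_toFinset _ hnRy).symm)
  rw [hprod]
  refine (Finset.sum_subset ?_ ?_).symm
  · -- every candidate window lies inside the bounding-box ranges
    intro q hq
    rw [List.mem_toFinset, hmemW] at hq
    obtain ⟨p, hp, hwin⟩ := hq
    have h1 := hbx p hp
    have h2 := hby p hp
    simp only [pvWins, List.mem_cons, List.not_mem_nil, or_false] at hwin
    rw [Finset.mem_product, List.mem_toFinset, List.mem_toFinset, hRx, hRy,
      PySem.List.mem_pyRange_one, PySem.List.mem_pyRange_one]
    rcases hwin with rfl | rfl | rfl | rfl <;> refine ⟨⟨by omega, by omega⟩, by omega, by omega⟩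
  · -- windows away from every blob cell contribute 0
    intro q _ hq
    rw [List.mem_toFinset, hmemW] at hq
    push Not at hq
    refine pvContrib_eq_zero blob q ?_ ?_ ?_ ?_
    · exact fun hmem => hq _ hmem (by simp [pvWins])
    · exact fun hmem => hq _ hmem (by simp [pvWins, Prod.ext_iff])
    · exact fun hmem => hq _ hmem (by simp [pvWins, Prod.ext_iff])
    · exact fun hmem => hq _ hmem (by simp [pvWins, Prod.ext_iff])
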